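-- pv_equiv track=rewrite | github.com/Mozhi21/oa_amazon | q1.py | min_unload
-- ===== SOURCE A (Python) =====
-- def min_unload(boxes:list[int], capacity:int) -> int:
--
--     def _binary_search(target):
--         lo, hi = -1, n
--         while lo < hi -1:
--             mid = (lo + hi) // 2
--             if boxes[mid] <= target:
--                 lo = mid
--             else:
--                 hi = mid
--         return hi
--
--     boxes.sort()
--     n = len(boxes)
--     curr_unloaded = n
--     for start in range(n):
--         target = boxes[start] * capacity
--         end = _binary_search(target)
--         curr_unloaded = min(curr_unloaded, start + (n - end))
--
--     return curr_unloaded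
-- ===== SOURCE B (Python) =====
-- def min_unload(boxes: list[int], capacity: int) -> int:
--     boxes.sort()
--     n = len(boxes)
--     best = n
--     e = 0
--     for i, b in enumerate(boxes):
--         t = b * capacity
--         while e < n and boxes[e] <= t:
--             e += 1
--         while e > 0 and boxes[e - 1] > t:
--             e -= 1
--         best = min(best, i + n - e)
--     return best
-- ===== Notes on version B (the rewrite author's own statement) =====
-- stated objective: faster
-- what changed: Replaced A's per-start binary search with a single amortized-O(n) two-pointer sweep: one pointer e tracks the count of boxes <= boxes[i]*capacity, advancing or retreating as the monotone target moves, instead of re-searching from scratch each iteration.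
import Mathlib
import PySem

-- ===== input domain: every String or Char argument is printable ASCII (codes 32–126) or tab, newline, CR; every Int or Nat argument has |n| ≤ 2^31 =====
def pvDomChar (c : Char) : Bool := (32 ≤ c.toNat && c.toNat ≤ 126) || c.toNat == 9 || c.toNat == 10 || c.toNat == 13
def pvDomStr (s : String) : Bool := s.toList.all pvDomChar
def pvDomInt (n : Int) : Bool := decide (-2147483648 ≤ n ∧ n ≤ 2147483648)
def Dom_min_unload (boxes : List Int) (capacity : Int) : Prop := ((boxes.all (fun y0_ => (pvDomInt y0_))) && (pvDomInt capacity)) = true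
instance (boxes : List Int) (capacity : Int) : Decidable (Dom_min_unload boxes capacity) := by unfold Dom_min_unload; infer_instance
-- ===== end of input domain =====

-- B replaces A's per-start binary search by a single two-pointer sweep whose pointer tracks
-- the count of boxes ≤ boxes[i]*capacity across iterations (objective: faster, measured).
-- A sorts `boxes` in place and B keeps that mutation; the equivalence is about the return value.

-- ===== PORT A =====
-- A's inner `_binary_search` while-loop; `boxes[mid]` is ported with pyGetD (the index `mid`
-- is always in range when the loop body runs, so the default is never used).
def bsearchA (bs : List Int) (target : Int) (lo hi : Int) : Int :=
  if _h : lo < hi - 1 then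
    let mid := PySem.Int.floordiv (lo + hi) 2
    if PySem.List.pyGetD bs mid 0 ≤ target then bsearchA bs target mid hi
    else bsearchA bs target lo mid
  else hi
termination_by (hi - lo).toNat
decreasing_by
  · have : lo < PySem.Int.floordiv (lo + hi) 2 := by
      simp only [PySem.Int.floordiv, Int.fdiv_eq_ediv]; simp; omega
    omega
  · have : PySem.Int.floordiv (lo + hi) 2 < hi := by
      simp only [PySem.Int.floordiv, Int.fdiv_eq_ediv]; simp; omega
    omega

def min_unload (boxes : List Int) (capacity : Int) : Int :=
  let bs := PySem.List.sorted boxes (fun x => x)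
  let n : Int := PySem.List.len bs
  (PySem.List.pyRange 0 n 1).foldl
    (fun curr start =>
      let target := PySem.List.pyGetD bs start 0 * capacity
      let e := bsearchA bs target (-1) n
      min curr (start + (n - e)))
    n

-- ===== PORT B =====
-- first while-loop: advance e while boxes[e] <= t
def advE (bs : List Int) (t : Int) (e : Int) : Int :=
  if _h : e < PySem.List.len bs ∧ PySem.List.pyGetD bs e 0 ≤ t then advE bs t (e + 1) else e
termination_by (PySem.List.len bs - e).toNat
decreasing_by omega

-- second while-loop: retreat e while boxes[e-1] > t
def retE (bs : List Int) (t : Int) (e : Int) : Int :=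
  if _h : 0 < e ∧ t < PySem.List.pyGetD bs (e - 1) 0 then retE bs t (e - 1) else e
termination_by e.toNat
decreasing_by omega

def min_unload_alt (boxes : List Int) (capacity : Int) : Int :=
  let bs := PySem.List.sorted boxes (fun x => x)
  let n : Int := PySem.List.len bs
  ((PySem.List.enumerate bs).foldl
    (fun st p =>
      let t := p.2 * capacity
      let e := retE bs t (advE bs t st.2)
      (min st.1 (p.1 + (n - e)), e))
    (n, 0)).1

-- ===== PRECONDITION & SPEC =====
def Spec_min_unload (boxes : List Int) (capacity : Int) (out : Int) : Prop := out = min_unload_alt boxes capacity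
instance (boxes : List Int) (capacity : Int) (out : Int) : Decidable (Spec_min_unload boxes capacity out) := by unfold Spec_min_unload; infer_instance

-- ===== CLAIM (what is proved, stated in full; the proofs are below) =====
def Claim_equal_min_unload : Prop := ∀ (boxes : List Int) (capacity : Int), Dom_min_unload boxes capacity → Spec_min_unload boxes capacity (min_unload boxes capacity)

-- ===== LEMMAS AND PROOFS =====

-- On a sorted list, `x ≤ t` holds exactly on the prefix of length `countP (· ≤ t)`.
theorem sorted_le_iff_lt_countP (bs : List Int) (t : Int)
    (hs : bs.Pairwise (· ≤ ·)) (j : Nat) (hj : j < bs.length) :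
    bs[j] ≤ t ↔ j < bs.countP (fun x => decide (x ≤ t)) := by
  induction bs generalizing j with
  | nil => simp at hj
  | cons x rest ih =>
    have hx : ∀ y ∈ rest, x ≤ y := (List.pairwise_cons.mp hs).1
    have hrest : rest.Pairwise (· ≤ ·) := (List.pairwise_cons.mp hs).2
    by_cases hxt : x ≤ t
    · cases j with
      | zero => simp [hxt]
      | succ k =>
        have hk : k < rest.length := by simpa using hj
        simp only [List.getElem_cons_succ, List.countP_cons, hxt]
        rw [ih hrest k hk]; simp
    · have hzero : rest.countP (fun x => decide (x ≤ t)) = 0 := by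
        rw [List.countP_eq_zero]
        intro y hy
        have := hx y hy
        simp; omega
      cases j with
      | zero => simp [hzero, hxt]
      | succ k =>
        have hk : k < rest.length := by simpa using hj
        have : ¬ rest[k] ≤ t := by
          have := hx rest[k] (List.getElem_mem hk); omega
        simp [hxt, hzero, this]

-- A's binary search returns the prefix count, for any (lo, hi) bracketing it.
theorem bsearchA_eq (bs : List Int) (t : Int) (hs : bs.Pairwise (· ≤ ·)) :
    ∀ (fuel : Nat) (lo hi : Int), (hi - lo).toNat ≤ fuel →
      -1 ≤ lo → hi ≤ (bs.length : Int) →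
      lo < (bs.countP (fun x => decide (x ≤ t)) : Int) →
      (bs.countP (fun x => decide (x ≤ t)) : Int) ≤ hi →
      bsearchA bs t lo hi = (bs.countP (fun x => decide (x ≤ t)) : Int) := by
  intro fuel
  induction fuel with
  | zero => intro lo hi hf _ _ hlo hhi; rw [bsearchA]; have : ¬ lo < hi - 1 := by omega
            simp [this]; omega
  | succ m ih =>
    intro lo hi hf h1 h2 hlo hhi
    rw [bsearchA]
    by_cases hcond : lo < hi - 1
    · simp only [hcond, dif_pos]
      have hmid1 : lo < PySem.Int.floordiv (lo + hi) 2 := by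
        simp only [PySem.Int.floordiv, Int.fdiv_eq_ediv]; simp; omega
      have hmid2 : PySem.Int.floordiv (lo + hi) 2 < hi := by
        simp only [PySem.Int.floordiv, Int.fdiv_eq_ediv]; simp; omega
      set mid := PySem.Int.floordiv (lo + hi) 2 with hmiddef
      have hmr : 0 ≤ mid ∧ mid < (bs.length : Int) := by omega
      have hget : PySem.List.pyGetD bs mid 0 = bs[mid.toNat] := by
        exact PySem.List.pyGetD_eq_getElem bs 0 hmr.1 hmr.2
      have hmlen : mid.toNat < bs.length := by omega
      by_cases hle : PySem.List.pyGetD bs mid 0 ≤ t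
      · simp only [hle, if_pos]
        have : mid.toNat < bs.countP (fun x => decide (x ≤ t)) := by
          rw [← sorted_le_iff_lt_countP bs t hs mid.toNat hmlen]
          rw [← hget]; exact hle
        exact ih mid hi (by omega) (by omega) h2 (by omega) hhi
      · simp only [hle, if_neg, not_false_iff]
        have : ¬ mid.toNat < bs.countP (fun x => decide (x ≤ t)) := by
          rw [← sorted_le_iff_lt_countP bs t hs mid.toNat hmlen]
          rw [← hget]; exact hle
        exact ih lo mid (by omega) h1 (by omega) hlo (by omega)
    · simp [hcond]; omega

-- stopping cases of the two while-loops, at the prefix count itself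
theorem advE_stop (bs : List Int) (t : Int) (hs : bs.Pairwise (· ≤ ·)) :
    advE bs t (bs.countP (fun x => decide (x ≤ t)) : Int) = (bs.countP (fun x => decide (x ≤ t)) : Int) := by
  rw [advE]
  apply dif_neg
  rintro ⟨hlt, hle⟩
  have hidx : (bs.countP (fun x => decide (x ≤ t))) < bs.length := by
    rw [PySem.List.len_eq] at hlt; omega
  have hget : PySem.List.pyGetD bs ((bs.countP (fun x => decide (x ≤ t)) : Int)) 0
      = bs[(bs.countP (fun x => decide (x ≤ t)))] := by
    have := PySem.List.pyGetD_eq_getElem bs (i := (bs.countP (fun x => decide (x ≤ t)) : Int)) 0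
      (by omega) (by omega)
    simpa using this
  have hn : ¬ bs[(bs.countP (fun x => decide (x ≤ t)))] ≤ t := by
    rw [sorted_le_iff_lt_countP bs t hs _ hidx]; omega
  rw [hget] at hle
  exact hn hle

theorem retE_stop (bs : List Int) (t : Int) (hs : bs.Pairwise (· ≤ ·)) :
    retE bs t (bs.countP (fun x => decide (x ≤ t)) : Int) = (bs.countP (fun x => decide (x ≤ t)) : Int) := by
  rw [retE]
  apply dif_neg
  rintro ⟨hpos, hgt⟩
  have hcl := List.countP_le_length (p := fun x => decide (x ≤ t)) (l := bs)
  have hidx : (bs.countP (fun x => decide (x ≤ t))) - 1 < bs.length := by omega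
  have hget : PySem.List.pyGetD bs ((bs.countP (fun x => decide (x ≤ t)) : Int) - 1) 0
      = bs[(bs.countP (fun x => decide (x ≤ t))) - 1] := by
    have := PySem.List.pyGetD_eq_getElem bs
      (i := (bs.countP (fun x => decide (x ≤ t)) : Int) - 1) 0 (by omega) (by omega)
    rw [this]; congr 1; omega
  have hle : bs[(bs.countP (fun x => decide (x ≤ t))) - 1] ≤ t := by
    rw [sorted_le_iff_lt_countP bs t hs _ hidx]; omega
  rw [hget] at hgt
  omega

-- the first while-loop reaches the count from below …
theorem advE_of_le (bs : List Int) (t : Int) (hs : bs.Pairwise (· ≤ ·)) :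
    ∀ (fuel : Nat) (e : Int), ((bs.countP (fun x => decide (x ≤ t)) : Int) - e).toNat ≤ fuel →
      0 ≤ e → e ≤ (bs.countP (fun x => decide (x ≤ t)) : Int) →
      advE bs t e = (bs.countP (fun x => decide (x ≤ t)) : Int) := by
  intro fuel
  have hcl := List.countP_le_length (p := fun x => decide (x ≤ t)) (l := bs)
  induction fuel with
  | zero =>
    intro e hf h0 hc
    have he : e = (bs.countP (fun x => decide (x ≤ t)) : Int) := by omega
    subst he
    exact advE_stop bs t hs
  | succ m ih =>
    intro e hf h0 hc
    by_cases he : e = (bs.countP (fun x => decide (x ≤ t)) : Int)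
    · subst he; exact advE_stop bs t hs
    · rw [advE]
      have hec : e < (bs.countP (fun x => decide (x ≤ t)) : Int) := by omega
      have hidx : e.toNat < bs.length := by omega
      have hget : PySem.List.pyGetD bs e 0 = bs[e.toNat] :=
        PySem.List.pyGetD_eq_getElem bs 0 h0 (by omega)
      have hle : bs[e.toNat] ≤ t := by
        rw [sorted_le_iff_lt_countP bs t hs _ hidx]; omega
      have hcond : e < PySem.List.len bs ∧ PySem.List.pyGetD bs e 0 ≤ t := by
        constructor
        · rw [PySem.List.len_eq]; omega
        · rw [hget]; exact hle
      rw [dif_pos hcond]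
      exact ih (e + 1) (by omega) (by omega) (by omega)

-- … and does not move from above it
theorem advE_of_gt (bs : List Int) (t : Int) (hs : bs.Pairwise (· ≤ ·)) (e : Int)
    (hc : (bs.countP (fun x => decide (x ≤ t)) : Int) < e) :
    advE bs t e = e := by
  rw [advE]
  apply dif_neg
  rintro ⟨hlt, hle⟩
  have h0 : 0 ≤ e := by omega
  have hidx : e.toNat < bs.length := by rw [PySem.List.len_eq] at hlt; omega
  have hget : PySem.List.pyGetD bs e 0 = bs[e.toNat] :=
    PySem.List.pyGetD_eq_getElem bs 0 h0 (by omega)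
  have hn : ¬ bs[e.toNat] ≤ t := by
    rw [sorted_le_iff_lt_countP bs t hs _ hidx]; omega
  rw [hget] at hle
  exact hn hle

-- the second while-loop reaches the count from above
theorem retE_of_ge (bs : List Int) (t : Int) (hs : bs.Pairwise (· ≤ ·)) :
    ∀ (fuel : Nat) (e : Int), (e - (bs.countP (fun x => decide (x ≤ t)) : Int)).toNat ≤ fuel →
      (bs.countP (fun x => decide (x ≤ t)) : Int) ≤ e → e ≤ (bs.length : Int) →
      retE bs t e = (bs.countP (fun x => decide (x ≤ t)) : Int) := by
  intro fuel
  induction fuel with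
  | zero =>
    intro e hf hc hl
    have he : e = (bs.countP (fun x => decide (x ≤ t)) : Int) := by omega
    subst he
    exact retE_stop bs t hs
  | succ m ih =>
    intro e hf hc hl
    by_cases he : e = (bs.countP (fun x => decide (x ≤ t)) : Int)
    · subst he; exact retE_stop bs t hs
    · rw [retE]
      have hec : (bs.countP (fun x => decide (x ≤ t)) : Int) < e := by omega
      have hidx : (e - 1).toNat < bs.length := by omega
      have hget : PySem.List.pyGetD bs (e - 1) 0 = bs[(e - 1).toNat] :=
        PySem.List.pyGetD_eq_getElem bs 0 (by omega) (by omega)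
      have hgt : t < bs[(e - 1).toNat] := by
        have hn : ¬ bs[(e - 1).toNat] ≤ t := by
          rw [sorted_le_iff_lt_countP bs t hs _ hidx]; omega
        omega
      have hcond : 0 < e ∧ t < PySem.List.pyGetD bs (e - 1) 0 := ⟨by omega, by rw [hget]; exact hgt⟩
      rw [dif_pos hcond]
      exact ih (e - 1) (by omega) (by omega) (by omega)

-- one loop iteration: from any pointer in [0, n] the sweep lands on the prefix count
theorem sweep_eq (bs : List Int) (t : Int) (hs : bs.Pairwise (· ≤ ·)) (e : Int)
    (h0 : 0 ≤ e) (hl : e ≤ (bs.length : Int)) :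
    retE bs t (advE bs t e) = (bs.countP (fun x => decide (x ≤ t)) : Int) := by
  have hcl := List.countP_le_length (p := fun x => decide (x ≤ t)) (l := bs)
  by_cases hle : e ≤ (bs.countP (fun x => decide (x ≤ t)) : Int)
  · rw [advE_of_le bs t hs ((bs.countP (fun x => decide (x ≤ t)) : Int) - e).toNat e
      (le_refl _) h0 hle]
    exact retE_of_ge bs t hs 0 _ (by omega) (le_refl _) (by omega)
  · rw [advE_of_gt bs t hs e (by omega)]
    exact retE_of_ge bs t hs (e - (bs.countP (fun x => decide (x ≤ t)) : Int)).toNat e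
      (le_refl _) (by omega) hl

-- the paired fold of B projects to a plain min-fold once every pointer step is the count
theorem foldB_fst (bs : List Int) (capacity : Int) (hs : bs.Pairwise (· ≤ ·)) :
    ∀ (ps : List (Int × Int)) (best e0 : Int), 0 ≤ e0 → e0 ≤ (bs.length : Int) →
    (ps.foldl
      (fun st p =>
        (min st.1 (p.1 + (PySem.List.len bs - retE bs (p.2 * capacity) (advE bs (p.2 * capacity) st.2))),
         retE bs (p.2 * capacity) (advE bs (p.2 * capacity) st.2)))
      (best, e0)).1
    = ps.foldl
        (fun b p => min b (p.1 + (PySem.List.len bs - (bs.countP (fun x => decide (x ≤ p.2 * capacity)) : Int))))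
        best := by
  intro ps
  induction ps with
  | nil => intro best e0 _ _; rfl
  | cons p ps ih =>
    intro best e0 h0 hl
    have hstep := sweep_eq bs (p.2 * capacity) hs e0 h0 hl
    have hcl := List.countP_le_length (p := fun x => decide (x ≤ p.2 * capacity)) (l := bs)
    simp only [List.foldl_cons, hstep]
    exact ih _ _ (by omega) (by omega)

-- assembled equality over the shared sorted list
theorem final_eq (bs : List Int) (capacity : Int) (hs : bs.Pairwise (· ≤ ·)) :
    (PySem.List.pyRange 0 (PySem.List.len bs) 1).foldl
      (fun curr start =>
        min curr (start + (PySem.List.len bs -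
          bsearchA bs (PySem.List.pyGetD bs start 0 * capacity) (-1) (PySem.List.len bs))))
      (PySem.List.len bs)
    = ((PySem.List.enumerate bs).foldl
        (fun st p =>
          (min st.1 (p.1 + (PySem.List.len bs - retE bs (p.2 * capacity) (advE bs (p.2 * capacity) st.2))),
           retE bs (p.2 * capacity) (advE bs (p.2 * capacity) st.2)))
        (PySem.List.len bs, 0)).1 := by
  have hb : ∀ t : Int, bsearchA bs t (-1) (PySem.List.len bs)
      = (bs.countP (fun x => decide (x ≤ t)) : Int) := by
    intro t
    have hcle := List.countP_le_length (p := fun x => decide (x ≤ t)) (l := bs)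
    rw [PySem.List.len_eq]
    exact bsearchA_eq bs t hs (bs.length + 1) (-1) (bs.length) (by omega) (by omega)
      (by omega) (by omega) (by exact_mod_cast hcle)
  rw [foldB_fst bs capacity hs (PySem.List.enumerate bs) (PySem.List.len bs) 0
    (le_refl 0) (by positivity)]
  rw [PySem.List.enumerate_eq_map_pyRange bs 0, List.foldl_map]
  congr 1
  funext curr start
  rw [hb]

-- ===== VERDICT (by name: the statement is the Claim_ definition above) =====
theorem min_unload_spec : Claim_equal_min_unload := by
  intro boxes capacity _
  unfold Spec_min_unload min_unload min_unload_alt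
  exact final_eq (PySem.List.sorted boxes (fun x => x)) capacity
    (by simpa using PySem.List.sorted_pairwise boxes (fun x => x))
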